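-- pv_equiv track=rewrite | github.com/Dagm-M/A2SV | LargestLocalValuesInAMatrix.py | largestLocal
-- ===== SOURCE A (Python) =====
-- from typing import List
--
-- def largestLocal(grid: List[List[int]]) -> List[List[int]]:
--     matrix = []
--     matrix2 = []
--
--     for col in grid:
--         temp = []
--         for index in range(3,len(col) + 1):
--             temp.append(max(col[index -3: index]))
--
--         matrix.append(temp)
--
--     for index in range(len(matrix[0])):
--         temp = []
--         for col in  matrix:
--             temp.append(col[index])
--
--         matrix2.append(temp)
--
--     matrix = []
--
--     for col in matrix2:
--         temp = []
--         for index in range(3,len(col) + 1):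
--             temp.append(max(col[index -3: index]))
--
--         matrix.append(temp)
--
--     matrix2 = []
--
--     for index in range(len(matrix[0])):
--         temp = []
--         for col in  matrix:
--             temp.append(col[index])
--
--         matrix2.append(temp)
--
--     return matrix2
-- ===== SOURCE B (Python) =====
-- from typing import List
--
-- def largestLocal(grid: List[List[int]]) -> List[List[int]]:
--     t = [[row[j] for row in grid] for j in range(len(grid[0]))]
--     outT = [[max(t[j][i:i+3] + t[j+1][i:i+3] + t[j+2][i:i+3])
--              for i in range(len(t[0]) - 2)]
--             for j in range(len(t) - 2)]
--     return [[outT[j][i] for j in range(len(outT))] for i in range(len(outT[0]))]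
-- ===== Notes on version B (the rewrite author's own statement) =====
-- stated objective: alternative
-- what changed: Replaces A's separable four-stage pipeline of 1-D sliding 3-max passes (row windows, transpose, row windows again, transpose) with a transpose of the grid followed by taking each output cell directly as the max of the nine entries of its 3x3 block (three column segments), computed column-major and transposed back - no sliding-window maxima at all.
import Mathlib
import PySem

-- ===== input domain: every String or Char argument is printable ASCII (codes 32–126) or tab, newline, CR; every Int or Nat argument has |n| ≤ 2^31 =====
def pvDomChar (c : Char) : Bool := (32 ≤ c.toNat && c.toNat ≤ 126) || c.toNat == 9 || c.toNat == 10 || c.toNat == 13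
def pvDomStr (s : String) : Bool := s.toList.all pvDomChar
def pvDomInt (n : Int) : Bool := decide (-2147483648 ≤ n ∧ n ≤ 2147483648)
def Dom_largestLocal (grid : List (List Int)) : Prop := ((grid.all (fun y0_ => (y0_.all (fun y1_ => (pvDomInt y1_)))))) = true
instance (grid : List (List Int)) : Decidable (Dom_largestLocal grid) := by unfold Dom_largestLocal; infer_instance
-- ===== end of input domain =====

-- B replaces A's separable pipeline of 1-D sliding 3-max passes with a transpose of
-- the grid followed by a direct max over the nine entries of each 3x3 block, computed
-- column-major and transposed back (objective: alternative; same asymptotic cost).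

-- ===== PORT A =====
-- 'for index in range(3, len(col)+1): temp.append(max(col[index-3:index]))'
-- (the slice always has 3 elements here, so Python's max never sees an empty list and
-- the .getD 0 default of max? is never the value)
def pvSlide (col : List Int) : List Int :=
  (PySem.List.pyRange 3 ((col.length : Int) + 1)).foldl
    (fun temp index =>
      temp ++ [(PySem.List.max? (PySem.List.slice col (some (index - 3)) (some index)) id).getD 0]) []

-- 'for index in range(len(m[0])): temp = [col[index] for col in m]'.
-- Python's m[0] raises on m = [] and col[index] raises when out of range; both are
-- outside Pre_, where the .headD [] / .getD 0 defaults are never the value.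
def pvTranspose (m : List (List Int)) : List (List Int) :=
  (PySem.List.pyRange 0 (((m.headD []).length : Int))).foldl
    (fun m2 index =>
      m2 ++ [m.foldl (fun temp col => temp ++ [(PySem.List.pyGet? col index).getD 0]) []]) []

def largestLocal (grid : List (List Int)) : List (List Int) :=
  let matrix := grid.foldl (fun m col => m ++ [pvSlide col]) []
  let matrix2 := pvTranspose matrix
  let matrix3 := matrix2.foldl (fun m col => m ++ [pvSlide col]) []
  pvTranspose matrix3

-- ===== PORT B =====
-- 't = [[row[j] for row in grid] for j in range(len(grid[0]))]': grid[0] raises on an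
-- empty grid and row[j] raises on a row shorter than len(grid[0]); both are outside
-- Pre_, where the .headD [] / .getD defaults are never the value
def pvColsB (grid : List (List Int)) : List (List Int) :=
  (PySem.List.pyRange 0 (((grid.headD []).length : Int))).map
    (fun j => grid.map (fun row => (PySem.List.pyGet? row j).getD 0))

-- 'max(t[j][i:i+3] + t[j+1][i:i+3] + t[j+2][i:i+3])': the three column segments of the
-- 3x3 block (the concatenation is nonempty inside Pre_, so max?'s default is inert)
def pvBlockB (t : List (List Int)) (i j : Int) : Int :=
  (PySem.List.max?
    (PySem.List.slice ((PySem.List.pyGet? t j).getD []) (some i) (some (i + 3))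
      ++ PySem.List.slice ((PySem.List.pyGet? t (j + 1)).getD []) (some i) (some (i + 3))
      ++ PySem.List.slice ((PySem.List.pyGet? t (j + 2)).getD []) (some i) (some (i + 3))) id).getD 0

-- 'outT = [[max(...) for i in range(len(t[0]) - 2)] for j in range(len(t) - 2)]' and
-- 'return [[outT[j][i] for j in range(len(outT))] for i in range(len(outT[0]))]':
-- t[0] and outT[0] raise IndexError when empty (len(grid[0]) = 0, resp. < 3); outside
-- Pre_, where the .getD [] defaults are never the value
def largestLocal_alt (grid : List (List Int)) : List (List Int) :=
  let t := pvColsB grid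
  let outT := (PySem.List.pyRange 0 ((t.length : Int) - 2)).map (fun j =>
    (PySem.List.pyRange 0 ((((PySem.List.pyGet? t 0).getD []).length : Int) - 2)).map
      (fun i => pvBlockB t i j))
  (PySem.List.pyRange 0 ((((PySem.List.pyGet? outT 0).getD []).length : Int))).map (fun i =>
    (PySem.List.pyRange 0 ((outT.length : Int))).map
      (fun j => (PySem.List.pyGet? ((PySem.List.pyGet? outT j).getD []) i).getD 0))

-- ===== PRECONDITION & SPEC =====
-- Exactly the inputs on which the Python A returns normally: A raises IndexError on an
-- empty grid, on a first row shorter than 3, and on any row shorter than the first row.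
def Pre_largestLocal (grid : List (List Int)) : Prop :=
  grid ≠ [] ∧ 3 ≤ (grid.headD []).length ∧ ∀ row ∈ grid, (grid.headD []).length ≤ row.length
instance (grid : List (List Int)) : Decidable (Pre_largestLocal grid) := by
  unfold Pre_largestLocal; infer_instance

def pvWitness_largestLocal : List (List Int) := [[9, 9, 9, 9], [1, 2, 3, 4], [5, 6, 7, 8]]

def Spec_largestLocal (grid : List (List Int)) (out : List (List Int)) : Prop := out = largestLocal_alt grid
instance (grid : List (List Int)) (out : List (List Int)) : Decidable (Spec_largestLocal grid out) := by unfold Spec_largestLocal; infer_instance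

-- ===== CLAIM (what is proved, stated in full; the proofs are below) =====
def Claim_equal_largestLocal : Prop := ∀ (grid : List (List Int)), Dom_largestLocal grid → Pre_largestLocal grid → Spec_largestLocal grid (largestLocal grid)

-- ===== LEMMAS AND PROOFS =====

-- max of three, in the left-fold association Python's max produces
def pvMx3 (a b c : Int) : Int := max (max a b) c
-- row k of the grid, the 3-window max of a row, and the 3x3-block max
def pvRow (grid : List (List Int)) (k : Nat) : List Int := grid.getD k []
def pvF (row : List Int) (j : Nat) : Int :=
  pvMx3 (row.getD j 0) (row.getD (j+1) 0) (row.getD (j+2) 0)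
def pvE (grid : List (List Int)) (i j : Nat) : Int :=
  pvMx3 (pvF (pvRow grid i) j) (pvF (pvRow grid (i+1)) j) (pvF (pvRow grid (i+2)) j)

-- the left-fold max of nine values, regrouped column-wise into threes (atoms only: cheap for omega)
theorem pv_mx9 (a1 a2 a3 a4 a5 a6 a7 a8 a9 : Int) :
    max (max (max (max (max (max (max (max a1 a2) a3) a4) a5) a6) a7) a8) a9
      = pvMx3 (pvMx3 a1 a4 a7) (pvMx3 a2 a5 a8) (pvMx3 a3 a6 a9) := by
  unfold pvMx3
  ac_rfl

theorem pv_pyRange_nil {a b : Int} (h : b ≤ a) : PySem.List.pyRange a b = [] := by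
  rw [List.eq_nil_iff_forall_not_mem]
  intro x hx
  rw [PySem.List.mem_pyRange_one] at hx
  omega

theorem pv_pyRange_shift (k : Nat) (a : Int) :
    PySem.List.pyRange a (a + k) = (List.range k).map (fun (t : Nat) => a + (t : Int)) := by
  induction k generalizing a with
  | zero =>
    rw [pv_pyRange_nil (by omega)]
    rfl
  | succ k ih =>
    rw [List.range_succ_eq_map, PySem.List.pyRange_one_cons (by omega)]
    rw [List.map_cons, List.map_map]
    congr 1
    · omega
    · rw [show a + ((k + 1 : Nat) : Int) = (a + 1) + ((k : Nat) : Int) by push_cast; ring,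
        ih (a + 1)]
      apply List.map_congr_left
      intro t _
      simp only [Function.comp_apply, Nat.succ_eq_add_one]
      push_cast
      ring

theorem pv_maxcons (x : Int) (xs : List Int) :
    PySem.List.max? (x :: xs) id = some (xs.foldl max x) := by
  induction xs generalizing x with
  | nil => rfl
  | cons y ys ih =>
    rw [List.foldl_cons, ← ih (max x y)]
    show PySem.List.max? (x :: y :: ys) id = PySem.List.max? (max x y :: ys) id
    unfold PySem.List.max?
    rw [List.foldl_cons, List.foldl_cons, List.foldl_cons]
    congr 1
    show (if id x < id y then some y else some x) = some (max x y)
    simp only [id_eq]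
    split_ifs with h
    · congr 1
      omega
    · congr 1
      omega

theorem pv_max3 (a b c d : Int) :
    (PySem.List.max? [a, b, c] id).getD d = pvMx3 a b c := by
  rw [pv_maxcons]
  simp only [List.foldl_cons, List.foldl_nil, Option.getD_some]
  rfl

theorem pv_drop_take3 (col : List Int) (j : Nat) (h : j + 3 ≤ col.length) :
    (col.drop j).take 3 = [col.getD j 0, col.getD (j+1) 0, col.getD (j+2) 0] := by
  rw [List.drop_eq_getElem_cons (by omega), List.drop_eq_getElem_cons (by omega),
    List.drop_eq_getElem_cons (by omega)]
  simp only [List.take_succ_cons, List.take_zero]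
  rw [List.getD_eq_getElem?_getD, List.getElem?_eq_getElem (by omega : j < col.length),
    List.getD_eq_getElem?_getD, List.getElem?_eq_getElem (by omega : j + 1 < col.length),
    List.getD_eq_getElem?_getD, List.getElem?_eq_getElem (by omega : j + 2 < col.length)]
  rfl

-- pvSlide characterised as a map over List.range
theorem pv_slide_char (col : List Int) :
    pvSlide col = (List.range (col.length - 2)).map (fun (j : Nat) => pvF col j) := by
  unfold pvSlide
  rw [PySem.List.foldl_append_singleton_eq_map, List.nil_append]
  by_cases h : 2 ≤ col.length
  · rw [show (col.length : Int) + 1 = 3 + ((col.length - 2 : Nat) : Int) by omega,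
      pv_pyRange_shift, List.map_map]
    apply List.map_congr_left
    intro t ht
    rw [List.mem_range] at ht
    simp only [Function.comp_apply]
    rw [show (3 : Int) + (t : Int) - 3 = ((t : Nat) : Int) by ring,
      show (3 : Int) + (t : Int) = ((t + 3 : Nat) : Int) by omega,
      PySem.List.slice_natCast, show t + 3 - t = 3 by omega,
      pv_drop_take3 col t (by omega), pv_max3]
    rfl
  · rw [pv_pyRange_nil (by omega), show col.length - 2 = 0 by omega]
    rfl

-- pvTranspose characterised as a map over List.range
theorem pv_transpose_char (m : List (List Int)) :
    pvTranspose m = (List.range (m.headD []).length).map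
      (fun (j : Nat) => m.map (fun col => (PySem.List.pyGet? col ((j : Nat) : Int)).getD 0)) := by
  unfold pvTranspose
  rw [PySem.List.pyRange_zero_natCast, List.foldl_map,
    PySem.List.foldl_append_singleton_eq_map, List.nil_append]
  apply List.map_congr_left
  intro j _
  rw [PySem.List.foldl_append_singleton_eq_map, List.nil_append]

-- getD of a mapped list at an in-range index
theorem pv_getD_map {α β : Type} (xs : List α) (f : α → β) (k : Nat) (d : β) (da : α)
    (hk : k < xs.length) : (xs.map f).getD k d = f (xs.getD k da) := by
  rw [List.getD_eq_getElem?_getD, List.getElem?_map, List.getElem?_eq_getElem hk]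
  simp [List.getD_eq_getElem?_getD, List.getElem?_eq_getElem hk]

-- the cast-index pyGet? with default is getD
theorem pv_get_eq (row : List Int) (j : Nat) (d : Int) :
    (PySem.List.pyGet? row ((j : Nat) : Int)).getD d = row.getD j d := by
  rw [PySem.List.pyGet?_natCast, List.getD_eq_getElem?_getD]

-- ===== characterisation of A =====
theorem pvA_char (grid : List (List Int)) (hne : grid ≠ [])
    (hm : 3 ≤ (grid.headD []).length)
    (hrows : ∀ row ∈ grid, (grid.headD []).length ≤ row.length) :
    largestLocal grid = (List.range (grid.length - 2)).map
      (fun (i : Nat) => (List.range ((grid.headD []).length - 2)).map (fun (j : Nat) => pvE grid i j)) := by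
  obtain ⟨g0, gt, rfl⟩ := List.exists_cons_of_ne_nil hne
  simp only [List.headD_cons] at hm hrows ⊢
  unfold largestLocal
  simp only [PySem.List.foldl_append_singleton_eq_map, List.nil_append]
  have hmat2 : pvTranspose ((g0 :: gt).map pvSlide)
      = (List.range (g0.length - 2)).map
          (fun (j : Nat) => (g0 :: gt).map (fun row => pvF row j)) := by
    rw [pv_transpose_char]
    rw [show ((g0 :: gt).map pvSlide).headD [] = pvSlide g0 from rfl,
      pv_slide_char g0, List.length_map, List.length_range]
    apply List.map_congr_left
    intro j hj
    rw [List.mem_range] at hj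
    rw [List.map_map]
    apply List.map_congr_left
    intro row hrowmem
    have hlen : g0.length ≤ row.length := hrows row hrowmem
    simp only [Function.comp_apply, PySem.List.pyGet?_natCast, pv_slide_char]
    rw [List.getElem?_map, List.getElem?_range (by omega : j < row.length - 2)]
    rfl
  rw [hmat2]
  have hmat3 : ((List.range (g0.length - 2)).map
        (fun (j : Nat) => (g0 :: gt).map (fun row => pvF row j))).map pvSlide
      = (List.range (g0.length - 2)).map
          (fun (j : Nat) => (List.range ((g0 :: gt).length - 2)).map
            (fun (i : Nat) => pvE (g0 :: gt) i j)) := by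
    rw [List.map_map]
    apply List.map_congr_left
    intro j _
    simp only [Function.comp_apply]
    rw [pv_slide_char, List.length_map]
    apply List.map_congr_left
    intro i hi
    rw [List.mem_range] at hi
    simp only [List.length_cons] at hi
    simp only [pvF]
    rw [pv_getD_map _ _ i 0 [] (by simp only [List.length_cons]; omega),
      pv_getD_map _ _ (i+1) 0 [] (by simp only [List.length_cons]; omega),
      pv_getD_map _ _ (i+2) 0 [] (by simp only [List.length_cons]; omega)]
    rfl
  rw [hmat3]
  rw [pv_transpose_char]
  have hm2 : g0.length - 2 = (g0.length - 2 - 1) + 1 := by omega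
  rw [show ((List.range (g0.length - 2)).map
        (fun (j : Nat) => (List.range ((g0 :: gt).length - 2)).map
          (fun (i : Nat) => pvE (g0 :: gt) i j))).headD []
      = (List.range ((g0 :: gt).length - 2)).map (fun (i : Nat) => pvE (g0 :: gt) i 0) from by
    rw [hm2, List.range_succ_eq_map, List.map_cons, List.headD_cons]]
  rw [List.length_map, List.length_range]
  apply List.map_congr_left
  intro i hi
  rw [List.mem_range] at hi
  rw [List.map_map]
  apply List.map_congr_left
  intro j _
  simp only [Function.comp_apply, PySem.List.pyGet?_natCast]
  rw [List.getElem?_map, List.getElem?_range hi]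
  rfl

-- the transpose t of B, characterised as a map over List.range
theorem pv_colsB_char (grid : List (List Int)) :
    pvColsB grid = (List.range (grid.headD []).length).map
      (fun (j : Nat) => grid.map (fun row => row.getD j 0)) := by
  unfold pvColsB
  rw [PySem.List.pyRange_zero_natCast, List.map_map]
  apply List.map_congr_left
  intro j _
  simp only [Function.comp_apply]
  apply List.map_congr_left
  intro row _
  rw [pv_get_eq]

-- a column of t, read off through pyGet? at an in-range index
theorem pv_colsB_get (grid : List (List Int)) (k : Nat)
    (hk : k < (grid.headD []).length) :
    (PySem.List.pyGet? (pvColsB grid) ((k : Nat) : Int)).getD []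
      = grid.map (fun row => row.getD k 0) := by
  rw [pv_colsB_char, PySem.List.pyGet?_natCast, List.getElem?_map,
    List.getElem?_range hk]
  rfl

-- a 3-slice of a column of t is the three grid entries of the block's column
theorem pv_colsB_slice (grid : List (List Int)) (i k : Nat)
    (hk : k < (grid.headD []).length) (hi : i + 3 ≤ grid.length) :
    PySem.List.slice ((PySem.List.pyGet? (pvColsB grid) ((k : Nat) : Int)).getD [])
        (some ((i : Nat) : Int)) (some (((i : Nat) : Int) + 3))
      = [(pvRow grid i).getD k 0, (pvRow grid (i+1)).getD k 0, (pvRow grid (i+2)).getD k 0] := by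
  rw [pv_colsB_get grid k hk,
    show ((i : Nat) : Int) + 3 = ((i + 3 : Nat) : Int) by push_cast; ring,
    PySem.List.slice_natCast, show i + 3 - i = 3 by omega,
    pv_drop_take3 _ i (by rw [List.length_map]; omega)]
  rw [pv_getD_map _ _ i 0 [] (by omega), pv_getD_map _ _ (i+1) 0 [] (by omega),
    pv_getD_map _ _ (i+2) 0 [] (by omega)]
  rfl

-- the 3x3-block max of B equals pvE
set_option maxHeartbeats 1000000 in
theorem pv_blockB_max (grid : List (List Int)) (i j : Nat)
    (hj : j + 3 ≤ (grid.headD []).length) (hi : i + 3 ≤ grid.length) :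
    pvBlockB (pvColsB grid) ((i : Nat) : Int) ((j : Nat) : Int) = pvE grid i j := by
  unfold pvBlockB
  rw [show ((j : Nat) : Int) + 1 = ((j + 1 : Nat) : Int) by push_cast; ring,
    show ((j : Nat) : Int) + 2 = ((j + 2 : Nat) : Int) by push_cast; ring,
    pv_colsB_slice grid i j (by omega) hi,
    pv_colsB_slice grid i (j+1) (by omega) hi,
    pv_colsB_slice grid i (j+2) (by omega) hi]
  simp only [List.cons_append, List.nil_append]
  rw [pv_maxcons]
  simp only [List.foldl_cons, List.foldl_nil, Option.getD_some]
  rw [pv_mx9]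
  unfold pvE pvF
  rfl

-- ===== characterisation of B =====
theorem pvB_char (grid : List (List Int)) (hm : 3 ≤ (grid.headD []).length) :
    largestLocal_alt grid = (List.range (grid.length - 2)).map
      (fun (i : Nat) => (List.range ((grid.headD []).length - 2)).map (fun (j : Nat) => pvE grid i j)) := by
  unfold largestLocal_alt
  simp only
  have ht : (pvColsB grid).length = (grid.headD []).length := by
    rw [pv_colsB_char, List.length_map, List.length_range]
  have h0 : ((PySem.List.pyGet? (pvColsB grid) 0).getD []).length = grid.length := by
    rw [show (0 : Int) = ((0 : Nat) : Int) from rfl, pv_colsB_get grid 0 (by omega),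
      List.length_map]
  -- the column-major intermediate outT, characterised as a map over List.range
  have hOutT : (PySem.List.pyRange 0 (((pvColsB grid).length : Int) - 2)).map (fun j =>
      (PySem.List.pyRange 0
          ((((PySem.List.pyGet? (pvColsB grid) 0).getD []).length : Int) - 2)).map
        (fun i => pvBlockB (pvColsB grid) i j))
      = (List.range ((grid.headD []).length - 2)).map (fun (j : Nat) =>
          (List.range (grid.length - 2)).map (fun (i : Nat) => pvE grid i j)) := by
    rw [ht, h0,
      show ((grid.headD []).length : Int) - 2
        = (0 : Int) + (((grid.headD []).length - 2 : Nat) : Int) by omega,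
      pv_pyRange_shift, List.map_map]
    apply List.map_congr_left
    intro j hj
    rw [List.mem_range] at hj
    simp only [Function.comp_apply]
    by_cases hL : 3 ≤ grid.length
    · rw [show (grid.length : Int) - 2 = (0 : Int) + ((grid.length - 2 : Nat) : Int) by omega,
        pv_pyRange_shift, List.map_map]
      apply List.map_congr_left
      intro i hi
      rw [List.mem_range] at hi
      simp only [Function.comp_apply]
      rw [show (0 : Int) + ((i : Nat) : Int) = ((i : Nat) : Int) by ring,
        show (0 : Int) + ((j : Nat) : Int) = ((j : Nat) : Int) by ring,
        pv_blockB_max grid i j (by omega) (by omega)]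
    · rw [pv_pyRange_nil (by omega), show grid.length - 2 = 0 by omega]
      rfl
  rw [hOutT]
  -- the first row of outT (the first output column), and the final transpose back
  have hfst : (PySem.List.pyGet? ((List.range ((grid.headD []).length - 2)).map (fun (j : Nat) =>
        (List.range (grid.length - 2)).map (fun (i : Nat) => pvE grid i j))) 0).getD []
      = (List.range (grid.length - 2)).map (fun (i : Nat) => pvE grid i 0) := by
    rw [show (0 : Int) = ((0 : Nat) : Int) from rfl, PySem.List.pyGet?_natCast,
      List.getElem?_map, List.getElem?_range (by omega : 0 < (grid.headD []).length - 2)]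
    rfl
  rw [hfst, List.length_map, List.length_range, List.length_map, List.length_range]
  simp only [PySem.List.pyRange_zero_natCast, List.map_map]
  apply List.map_congr_left
  intro i hi
  rw [List.mem_range] at hi
  simp only [Function.comp_apply]
  apply List.map_congr_left
  intro j hj
  rw [List.mem_range] at hj
  simp only [Function.comp_apply, PySem.List.pyGet?_natCast, List.getElem?_map,
    List.getElem?_range hj, Option.map_some, Option.getD_some, List.getElem?_range hi]

-- ===== VERDICT (by name: the statement is the Claim_ definition above) =====
theorem largestLocal_spec : Claim_equal_largestLocal := by
  intro grid _ hPre
  obtain ⟨hne, hm, hrows⟩ := hPre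
  unfold Spec_largestLocal
  rw [pvA_char grid hne hm hrows, pvB_char grid hm]
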